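-- pv_equiv track=rewrite | github.com/solenn-tl/land_registry_tables_processing_TPDL_2025 | scripts/utils/string_utils.py | split_text_at_characters
-- ===== SOURCE A (Python) =====
-- def split_text_at_characters(text, chars_to_split):
--     """
--     Split a text at the occurrences of characters from a given list.
--
--     Parameters:
--     text (str): The original text to be split.
--     chars_to_split (list): A list of characters at which to split the text.
--
--     Returns:
--     list: A list of substrings split at the specified characters.
--     """
--     # Create a set of characters to split at for faster lookup
--     split_chars = set(chars_to_split)
--
--     # Initialize an empty list to hold the split substrings
--     result = []
--     # Initialize a temporary string to build the current substring
--     current_substring = []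
--
--     special_chars = []
--     # Iterate through each character in the text
--     for char in text:
--         if char in split_chars:
--             special_chars.append(char)
--             # If the character is in the split list, join the current substring and add it to the result
--             if current_substring:
--                 result.append(''.join(current_substring))
--                 current_substring = []
--         else:
--             # Otherwise, add the character to the current substring
--             current_substring.append(char)
--
--     # Add the last substring to the result if it's not empty
--     if current_substring:
--         result.append(''.join(current_substring))
--     return result, special_chars
-- ===== SOURCE B (Python) =====
-- def split_text_at_characters(text, chars_to_split):
--     split_chars = set(chars_to_split)
--     # independent pass: the delimiters actually occurring, in order
--     special_chars = [c for c in text if c in split_chars]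
--     # two-pointer run scan: skip delimiters, then grab a maximal non-delimiter run
--     result = []
--     i, n = 0, len(text)
--     while i < n:
--         if text[i] in split_chars:
--             i += 1
--             continue
--         j = i
--         while j < n and text[j] not in split_chars:
--             j += 1
--         result.append(text[i:j])
--         i = j
--     return result, special_chars
-- ===== Notes on version B (the rewrite author's own statement) =====
-- stated objective: alternative
-- what changed: Replaces A's single stateful accumulator loop (building result, current_substring and special_chars together) by two independent passes: a filtering comprehension for the delimiters and a two-pointer run scan that slices out each maximal non-delimiter run.
import Mathlib
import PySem

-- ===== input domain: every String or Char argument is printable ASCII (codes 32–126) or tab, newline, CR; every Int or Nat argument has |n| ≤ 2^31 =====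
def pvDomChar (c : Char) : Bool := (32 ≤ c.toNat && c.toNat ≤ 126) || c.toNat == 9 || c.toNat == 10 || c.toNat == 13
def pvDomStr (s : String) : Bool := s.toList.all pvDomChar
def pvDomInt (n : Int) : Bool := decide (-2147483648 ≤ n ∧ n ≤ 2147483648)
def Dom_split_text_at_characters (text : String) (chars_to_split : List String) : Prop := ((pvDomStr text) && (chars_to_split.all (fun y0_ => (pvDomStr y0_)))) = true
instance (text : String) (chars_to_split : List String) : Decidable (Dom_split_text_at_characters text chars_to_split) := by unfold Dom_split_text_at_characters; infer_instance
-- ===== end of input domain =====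

-- B replaces A's single stateful accumulator loop by two independent passes:
-- a filter for the occurring delimiters and a run scan collecting maximal
-- non-delimiter runs ("alternative" decomposition, same cost).

-- ===== PORT A =====
-- one step of A's for-loop over (result, current_substring, special_chars)
def split_text_at_characters (text : String) (chars_to_split : List String) : List String × List String :=
  let split_chars : PySem.Set String := PySem.Set.ofList chars_to_split
  let st := text.toList.foldl
    (fun (st : List String × List Char × List String) c =>
      if PySem.Set.contains split_chars (String.mk [c]) then
        ((if st.2.1.isEmpty then st.1 else st.1 ++ [String.mk st.2.1]), [],
          st.2.2 ++ [String.mk [c]])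
      else
        (st.1, st.2.1 ++ [c], st.2.2))
    ([], [], [])
  ((if st.2.1.isEmpty then st.1 else st.1 ++ [String.mk st.2.1]), st.2.2)

-- ===== PORT B =====
-- B's two-pointer while loop: skip delimiters, then slice out a maximal run
def pvRuns (d : Char → Bool) : List Char → List String
  | [] => []
  | c :: cs =>
      if d c then pvRuns d cs
      else String.mk (c :: cs.takeWhile (fun x => !d x)) ::
             pvRuns d (cs.dropWhile (fun x => !d x))
termination_by l => l.length
decreasing_by
  · simp
  · have := List.length_dropWhile_le (fun x => !d x) cs
    simp only [List.length_cons]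
    omega

def split_text_at_characters_alt (text : String) (chars_to_split : List String) : List String × List String :=
  let split_chars : PySem.Set String := PySem.Set.ofList chars_to_split
  let d : Char → Bool := fun c => PySem.Set.contains split_chars (String.mk [c])
  (pvRuns d text.toList, (text.toList.filter d).map (fun c => String.mk [c]))

-- ===== PRECONDITION & SPEC =====
def Spec_split_text_at_characters (text : String) (chars_to_split : List String) (out : List String × List String) : Prop := out = split_text_at_characters_alt text chars_to_split
instance (text : String) (chars_to_split : List String) (out : List String × List String) : Decidable (Spec_split_text_at_characters text chars_to_split out) := by unfold Spec_split_text_at_characters; infer_instance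

-- ===== CLAIM (what is proved, stated in full; the proofs are below) =====
def Claim_equal_split_text_at_characters : Prop := ∀ (text : String) (chars_to_split : List String), Dom_split_text_at_characters text chars_to_split → Spec_split_text_at_characters text chars_to_split (split_text_at_characters text chars_to_split)

-- ===== LEMMAS AND PROOFS =====

theorem pvRuns_all_not {d : Char → Bool} {cur : List Char}
    (h : ∀ x ∈ cur, d x = false) :
    pvRuns d cur = if cur.isEmpty then [] else [String.mk cur] := by
  cases cur with
  | nil => simp [pvRuns]
  | cons a as =>
    have ha : d a = false := h a (by simp)
    have htw : as.takeWhile (fun x => !d x) = as :=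
      List.takeWhile_eq_self_iff.mpr (fun x hx => by simp [h x (by simp [hx])])
    have hdw : as.dropWhile (fun x => !d x) = [] :=
      List.dropWhile_eq_nil_iff.mpr (fun x hx => by simp [h x (by simp [hx])])
    rw [pvRuns, htw, hdw]
    simp [ha, pvRuns]

theorem takeWhile_append_delim {d : Char → Bool} {as : List Char} {c : Char} {l : List Char}
    (h : ∀ x ∈ as, d x = false) (hc : d c = true) :
    (as ++ c :: l).takeWhile (fun x => !d x) = as := by
  induction as with
  | nil => simp [List.takeWhile_cons, hc]
  | cons b bs ih =>
    have hb : d b = false := h b (by simp)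
    simp only [List.cons_append, List.takeWhile_cons, hb]
    simp [ih (fun x hx => h x (by simp [hx]))]

theorem dropWhile_append_delim {d : Char → Bool} {as : List Char} {c : Char} {l : List Char}
    (h : ∀ x ∈ as, d x = false) (hc : d c = true) :
    (as ++ c :: l).dropWhile (fun x => !d x) = c :: l := by
  induction as with
  | nil => simp [List.dropWhile_cons, hc]
  | cons b bs ih =>
    have hb : d b = false := h b (by simp)
    simp only [List.cons_append, List.dropWhile_cons, hb]
    simp [ih (fun x hx => h x (by simp [hx]))]

theorem pvRuns_delim {d : Char → Bool} {cur : List Char} {c : Char} {l : List Char}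
    (h : ∀ x ∈ cur, d x = false) (hc : d c = true) :
    pvRuns d (cur ++ c :: l)
      = (if cur.isEmpty then [] else [String.mk cur]) ++ pvRuns d l := by
  cases cur with
  | nil => simp [pvRuns, hc]
  | cons a as =>
    have ha : d a = false := h a (by simp)
    have htw : (as ++ c :: l).takeWhile (fun x => !d x) = as :=
      takeWhile_append_delim (fun x hx => h x (by simp [hx])) hc
    have hdw : (as ++ c :: l).dropWhile (fun x => !d x) = c :: l :=
      dropWhile_append_delim (fun x hx => h x (by simp [hx])) hc
    rw [List.cons_append, pvRuns, htw, hdw]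
    simp [ha, pvRuns, hc]

def pvStep (d : Char → Bool) (st : List String × List Char × List String) (c : Char) :
    List String × List Char × List String :=
  if d c then
    ((if st.2.1.isEmpty then st.1 else st.1 ++ [String.mk st.2.1]), [],
      st.2.2 ++ [String.mk [c]])
  else
    (st.1, st.2.1 ++ [c], st.2.2)

def pvFin (st : List String × List Char × List String) : List String × List String :=
  ((if st.2.1.isEmpty then st.1 else st.1 ++ [String.mk st.2.1]), st.2.2)

theorem foldA_eq {d : Char → Bool} (l : List Char) :
    ∀ (res : List String) (cur : List Char) (spec : List String),
    (∀ x ∈ cur, d x = false) →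
    pvFin (l.foldl (pvStep d) (res, cur, spec))
      = (res ++ pvRuns d (cur ++ l),
         spec ++ (l.filter d).map (fun c => String.mk [c])) := by
  induction l with
  | nil =>
    intro res cur spec h
    simp only [List.foldl_nil, List.append_nil, List.filter_nil, List.map_nil, pvFin]
    rw [pvRuns_all_not h]
    by_cases hcur : cur.isEmpty <;> simp [hcur]
  | cons c l ih =>
    intro res cur spec h
    simp only [List.foldl_cons, pvStep]
    by_cases hc : d c = true
    · rw [if_pos hc]
      have := ih (if cur.isEmpty then res else res ++ [String.mk cur]) []
        (spec ++ [String.mk [c]]) (by simp)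
      simp only [List.nil_append] at this
      rw [this, pvRuns_delim h hc]
      by_cases hcur : cur.isEmpty <;> simp [hcur, hc]
    · have hc' : d c = false := by simpa using hc
      rw [if_neg hc]
      have := ih res (cur ++ [c]) spec (by
        intro x hx
        rcases List.mem_append.mp hx with h1 | h1
        · exact h x h1
        · simp at h1; subst h1; exact hc')
      rw [this]
      simp [hc', List.append_assoc]

-- ===== VERDICT (by name: the statement is the Claim_ definition above) =====
theorem split_text_at_characters_spec : Claim_equal_split_text_at_characters := by
  intro text chars_to_split _
  unfold Spec_split_text_at_characters split_text_at_characters split_text_at_characters_alt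
  have key := foldA_eq
    (d := fun c => PySem.Set.contains (PySem.Set.ofList chars_to_split) (String.mk [c]))
    text.toList [] [] [] (by simp)
  exact key
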